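-- pv_equiv track=rewrite | github.com/Mehdi-Convergence/bettracker | src/services/live_features.py | _streak_from_form
-- ===== SOURCE A (Python) =====
-- def _streak_from_form(form: str) -> int:
--     """Consecutive win (+) or loss (−) streak from API form string (W/L/D)."""
--     if not form:
--         return 0
--     streak = 0
--     for c in reversed(form.upper()):
--         if c == "W" and streak >= 0:
--             streak += 1
--         elif c == "L" and streak <= 0:
--             streak -= 1
--         else:
--             break
--     return streak
-- ===== SOURCE B (Python) =====
-- def _streak_from_form(form: str) -> int:
--     # Build run-length groups left-to-right, then inspect only the final run.
--     runs = []
--     for c in form.upper():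
--         if runs and runs[-1][0] == c:
--             runs[-1] = (c, runs[-1][1] + 1)
--         else:
--             runs.append((c, 1))
--     if not runs:
--         return 0
--     k, n = runs[-1]
--     return n if k == "W" else -n if k == "L" else 0
-- ===== Notes on version B (the rewrite author's own statement) =====
-- stated objective: alternative
-- what changed: B builds the run-length group structure of the whole string in a single forward pass and reads only the final (char, length) run, instead of A's reversed accumulator scan with sign-guarded break.
import Mathlib
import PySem

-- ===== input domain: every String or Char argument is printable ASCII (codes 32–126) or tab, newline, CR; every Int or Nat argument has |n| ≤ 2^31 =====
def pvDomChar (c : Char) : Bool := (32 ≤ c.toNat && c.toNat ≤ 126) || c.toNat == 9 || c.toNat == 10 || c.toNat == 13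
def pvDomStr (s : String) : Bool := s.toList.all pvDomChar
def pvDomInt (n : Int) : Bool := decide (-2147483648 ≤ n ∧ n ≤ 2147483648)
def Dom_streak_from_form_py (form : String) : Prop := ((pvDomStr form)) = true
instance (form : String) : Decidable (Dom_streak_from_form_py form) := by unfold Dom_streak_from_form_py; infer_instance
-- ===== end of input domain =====

-- B builds the run-length group structure in one forward pass and reads only the final run,
-- instead of A's reversed accumulator scan; same value on every input (objective: alternative).

-- ===== PORT A =====
-- the reversed for-loop with break, accumulator `streak`
def pvALoop : List Char → Int → Int
  | [], s => s
  | c :: rest, s =>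
      if c = 'W' ∧ 0 ≤ s then pvALoop rest (s + 1)
      else if c = 'L' ∧ s ≤ 0 then pvALoop rest (s - 1)
      else s

def streak_from_form_py (form : String) : Int :=
  if form = "" then 0
  else pvALoop (PySem.Str.upper form).toList.reverse 0

-- ===== PORT B =====
-- runs[-1] update / append, as in Source B's forward loop
def pvAddRun (runs : List (Char × Int)) (c : Char) : List (Char × Int) :=
  match runs.getLast? with
  | some (k, n) => if k = c then runs.dropLast ++ [(c, n + 1)] else runs ++ [(c, 1)]
  | none => [(c, 1)]

def streak_from_form_py_alt (form : String) : Int :=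
  let runs := (PySem.Str.upper form).toList.foldl pvAddRun []
  match runs.getLast? with
  | none => 0
  | some (k, n) => if k = 'W' then n else if k = 'L' then -n else 0

-- ===== PRECONDITION & SPEC =====
def Spec_streak_from_form_py (form : String) (out : Int) : Prop := out = streak_from_form_py_alt form
instance (form : String) (out : Int) : Decidable (Spec_streak_from_form_py form out) := by unfold Spec_streak_from_form_py; infer_instance

-- ===== CLAIM (what is proved, stated in full; the proofs are below) =====
def Claim_equal_streak_from_form_py : Prop := ∀ (form : String), Dom_streak_from_form_py form → Spec_streak_from_form_py form (streak_from_form_py form)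

-- ===== LEMMAS AND PROOFS =====

-- A's loop, once the accumulator is strictly positive, counts the leading 'W' run
theorem pvALoop_pos (r : List Char) (n : Int) (hn : 0 < n) :
    pvALoop r n = n + ((r.takeWhile (· = 'W')).length : Int) := by
  induction r generalizing n with
  | nil => simp [pvALoop]
  | cons c rest ih =>
      by_cases hc : c = 'W'
      · simp only [pvALoop]
        rw [if_pos ⟨hc, le_of_lt hn⟩, ih (n + 1) (by omega),
          List.takeWhile_cons_of_pos (by simpa using hc)]
        simp; omega
      · have hW : ¬ (c = 'W' ∧ 0 ≤ n) := by intro h; exact hc h.1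
        have hL : ¬ (c = 'L' ∧ n ≤ 0) := by intro h; omega
        simp only [pvALoop, if_neg hW, if_neg hL]
        rw [List.takeWhile_cons_of_neg (by simpa using hc)]
        simp

-- and, once strictly negative, counts the leading 'L' run downward
theorem pvALoop_neg (r : List Char) (n : Int) (hn : n < 0) :
    pvALoop r n = n - ((r.takeWhile (· = 'L')).length : Int) := by
  induction r generalizing n with
  | nil => simp [pvALoop]
  | cons c rest ih =>
      by_cases hc : c = 'L'
      · have hW : ¬ (c = 'W' ∧ 0 ≤ n) := by intro h; omega
        simp only [pvALoop]
        rw [if_neg hW, if_pos ⟨hc, le_of_lt hn⟩, ih (n - 1) (by omega),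
          List.takeWhile_cons_of_pos (by simpa using hc)]
        simp; omega
      · have hW : ¬ (c = 'W' ∧ 0 ≤ n) := by intro h; omega
        have hL : ¬ (c = 'L' ∧ n ≤ 0) := by intro h; exact hc h.1
        simp only [pvALoop, if_neg hW, if_neg hL]
        rw [List.takeWhile_cons_of_neg (by simpa using hc)]
        simp

-- the last run B builds is the trailing run of the list
theorem pvRuns_getLast (l : List Char) (c : Char) :
    (List.foldl pvAddRun [] (l ++ [c])).getLast? =
      some (c, 1 + ((l.reverse.takeWhile (· = c)).length : Int)) := by
  induction l using List.reverseRecOn generalizing c with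
  | nil => simp [pvAddRun]
  | append_singleton l' b ih =>
      rw [List.foldl_append]
      simp only [List.foldl_cons, List.foldl_nil]
      by_cases hbc : b = c
      · simp only [pvAddRun, ih b]
        rw [if_pos hbc, List.getLast?_concat]
        subst hbc
        rw [List.reverse_append]
        simp only [List.reverse_cons, List.reverse_nil, List.nil_append, List.cons_append]
        rw [List.takeWhile_cons_of_pos (by simp)]
        simp; ring
      · simp only [pvAddRun, ih b]
        rw [if_neg hbc, List.getLast?_concat]
        rw [List.reverse_append]
        simp only [List.reverse_cons, List.reverse_nil, List.nil_append, List.singleton_append]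
        rw [List.takeWhile_cons_of_neg (by simpa using hbc)]
        simp

-- A's whole scan equals B's read of the final run
theorem pv_main (l : List Char) :
    pvALoop l.reverse 0 =
      match (List.foldl pvAddRun [] l).getLast? with
      | none => 0
      | some (k, n) => if k = 'W' then n else if k = 'L' then -n else 0 := by
  induction l using List.reverseRecOn with
  | nil => simp [pvALoop]
  | append_singleton l' c _ =>
      rw [pvRuns_getLast]
      simp only [List.reverse_append, List.reverse_cons, List.reverse_nil, List.nil_append,
        List.singleton_append]
      by_cases hcW : c = 'W'
      · simp only [pvALoop]
        rw [if_pos ⟨hcW, le_refl (0 : Int)⟩, show (0 : Int) + 1 = 1 from rfl,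
          pvALoop_pos l'.reverse 1 (by decide), if_pos hcW]
        subst hcW; ring
      · by_cases hcL : c = 'L'
        · have hW : ¬ (c = 'W' ∧ (0 : Int) ≤ 0) := fun h => hcW h.1
          simp only [pvALoop]
          rw [if_neg hW, if_pos ⟨hcL, le_refl (0 : Int)⟩, show (0 : Int) - 1 = -1 from rfl,
            pvALoop_neg l'.reverse (-1) (by decide), if_neg hcW, if_pos hcL]
          subst hcL; ring
        · have hW : ¬ (c = 'W' ∧ (0 : Int) ≤ 0) := fun h => hcW h.1
          have hL : ¬ (c = 'L' ∧ (0 : Int) ≤ 0) := fun h => hcL h.1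
          simp only [pvALoop]
          rw [if_neg hW, if_neg hL, if_neg hcW, if_neg hcL]

-- only the empty string has an empty uppercased character list
theorem pv_empty_iff (form : String) : form = "" ↔ (PySem.Str.upper form).toList = [] := by
  rw [PySem.Str.toList_upper]
  constructor
  · intro h; subst h; rfl
  · intro h
    have hlen : form.toList.length = 0 := by
      have := congrArg List.length h
      simpa [PySem.Chars.upper] using this
    exact String.toList_eq_nil_iff.mp (List.length_eq_zero_iff.mp hlen)

-- ===== VERDICT (by name: the statement is the Claim_ definition above) =====
theorem streak_from_form_py_spec : Claim_equal_streak_from_form_py := by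
  intro form _
  unfold Spec_streak_from_form_py streak_from_form_py streak_from_form_py_alt
  by_cases h : form = ""
  · rw [if_pos h]
    rw [(pv_empty_iff form).mp h]
    rfl
  · rw [if_neg h, pv_main]
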